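-- pv_equiv track=rewrite | github.com/Lunr127/Business-Intelligence-Lecture | 商务智能2/源代码/fp-growth.py | getrootpath
-- ===== SOURCE A (Python) =====
-- def getrootpath(kinds, newinfo, dict):
--     allinfo = {}
--     for kind in kinds:
--         kindarr = []
--         for item in newinfo:
--             # 如果这一条路径包含某个种类
--             itemarr = []
--             if kind in item:
--                 for value in item:
--                     if kind == value:
--                         break
--                     else:
--                         itemarr.append(value)
--             if itemarr:
--                 kindarr.append(itemarr)
--         allinfo[kind] = kindarr
--
--     return allinfo
-- ===== SOURCE B (Python) =====
-- def getrootpath(kinds, newinfo, dict):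
--     allinfo = {kind: [] for kind in kinds}
--     kindset = set(kinds)
--     for item in newinfo:
--         prefix = []
--         seen = set()
--         for value in item:
--             if value in kindset and value not in seen:
--                 seen.add(value)
--                 if prefix:
--                     allinfo[value].append(prefix.copy())
--             prefix.append(value)
--     return allinfo
-- ===== Notes on version B (the rewrite author's own statement) =====
-- stated objective: faster
-- what changed: Instead of re-scanning all of newinfo for each kind (membership test plus a prefix scan per kind), B makes a single pass over each item, growing the prefix incrementally and recording it in a pre-initialised dict at the first occurrence of each kind in the item, using a set for kind membership.
import Mathlib
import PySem

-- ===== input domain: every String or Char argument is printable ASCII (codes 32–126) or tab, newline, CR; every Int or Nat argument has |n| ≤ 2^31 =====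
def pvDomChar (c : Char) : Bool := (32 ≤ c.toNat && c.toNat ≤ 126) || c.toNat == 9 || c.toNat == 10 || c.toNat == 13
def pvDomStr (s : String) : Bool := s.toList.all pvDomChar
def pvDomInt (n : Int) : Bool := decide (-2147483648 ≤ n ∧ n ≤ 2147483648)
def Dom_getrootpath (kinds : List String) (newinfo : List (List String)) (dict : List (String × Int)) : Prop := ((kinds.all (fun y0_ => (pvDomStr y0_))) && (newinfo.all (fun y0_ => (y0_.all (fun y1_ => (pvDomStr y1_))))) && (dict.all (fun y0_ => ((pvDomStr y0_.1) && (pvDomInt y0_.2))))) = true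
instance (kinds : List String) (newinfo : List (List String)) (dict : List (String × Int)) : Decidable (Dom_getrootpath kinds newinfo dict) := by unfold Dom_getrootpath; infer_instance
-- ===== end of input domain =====

-- B replaces A's per-kind rescans of newinfo by one pass over each item with an incremental
-- prefix, recording at each kind's first occurrence (objective: faster; asymptotic).

-- ===== PORT A =====
-- A's inner 'for value in item: if kind == value: break else itemarr.append(value)' loop
def pvPrefixLoop (kind : String) : List String → List String
  | [] => []
  | v :: vs => if kind == v then [] else v :: pvPrefixLoop kind vs

def getrootpath (kinds : List String) (newinfo : List (List String)) (dict : List (String × Int)) : List (String × List (List String)) :=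
  (kinds.foldl (fun allinfo kind =>
      let kindarr := newinfo.foldl (fun kindarr item =>
        let itemarr : List String := if item.contains kind then pvPrefixLoop kind item else []
        if itemarr = [] then kindarr else kindarr ++ [itemarr]) []
      allinfo.insert kind kindarr)
    (PySem.Dict.empty : PySem.Dict String (List (List String)))).items

-- ===== PORT B =====
-- B's inner 'for value in item' loop: seen = kinds already recorded in this item, p = prefix so far
def pvItemLoop (ks : PySem.Set String) :
    List String → PySem.Set String → List String →
    PySem.Dict String (List (List String)) → PySem.Dict String (List (List String))
  | [], _, _, d => d
  | v :: vs, seen, p, d =>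
    if ks.contains v && !(seen.contains v) then
      pvItemLoop ks vs (seen.add v) (p ++ [v]) (if p = [] then d else d.modify v [] (· ++ [p]))
    else
      pvItemLoop ks vs seen (p ++ [v]) d

def getrootpath_alt (kinds : List String) (newinfo : List (List String)) (dict : List (String × Int)) : List (String × List (List String)) :=
  let allinfo := kinds.foldl (fun d k => d.insert k [])
    (PySem.Dict.empty : PySem.Dict String (List (List String)))
  let kindset := PySem.Set.ofList kinds
  (newinfo.foldl (fun d item => pvItemLoop kindset item PySem.Set.empty [] d) allinfo).items

-- ===== PRECONDITION & SPEC =====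
def Spec_getrootpath (kinds : List String) (newinfo : List (List String)) (dict : List (String × Int)) (out : List (String × List (List String))) : Prop := out = getrootpath_alt kinds newinfo dict
instance (kinds : List String) (newinfo : List (List String)) (dict : List (String × Int)) (out : List (String × List (List String))) : Decidable (Spec_getrootpath kinds newinfo dict out) := by unfold Spec_getrootpath; infer_instance

-- ===== CLAIM (what is proved, stated in full; the proofs are below) =====
def Claim_equal_getrootpath : Prop := ∀ (kinds : List String) (newinfo : List (List String)) (dict : List (String × Int)), Dom_getrootpath kinds newinfo dict → Spec_getrootpath kinds newinfo dict (getrootpath kinds newinfo dict)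

-- ===== LEMMAS AND PROOFS =====

-- A fold of inserts whose values depend only on the key: lookup afterwards
theorem pv_getD_foldl_insert (g : String → List (List String)) (k : String) :
    ∀ (l : List String) (d : PySem.Dict String (List (List String))),
      (l.foldl (fun d x => d.insert x (g x)) d).getD k []
        = if k ∈ l then g k else d.getD k [] := by
  intro l
  induction l with
  | nil => intro d; simp [List.foldl]
  | cons a l ih =>
    intro d
    simp only [List.foldl, ih, PySem.Dict.getD_insert, List.mem_cons]
    by_cases hl : k ∈ l <;> by_cases ha : k = a <;> simp [hl, ha]

-- what pvItemLoop does to one entry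
theorem pv_getD_itemLoop (ks : PySem.Set String) (k : String) :
    ∀ (rest : List String) (seen : PySem.Set String) (p : List String)
      (d : PySem.Dict String (List (List String))),
      (pvItemLoop ks rest seen p d).getD k []
        = if ks.contains k = true ∧ seen.contains k = false ∧ k ∈ rest then
            (if p ++ pvPrefixLoop k rest = [] then d.getD k []
             else d.getD k [] ++ [p ++ pvPrefixLoop k rest])
          else d.getD k [] := by
  intro rest
  induction rest with
  | nil => intro seen p d; simp [pvItemLoop]
  | cons v vs ih =>
    intro seen p d
    have hunfold : pvItemLoop ks (v :: vs) seen p d =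
        if (ks.contains v && !(seen.contains v)) = true then
          pvItemLoop ks vs (seen.add v) (p ++ [v]) (if p = [] then d else d.modify v [] (· ++ [p]))
        else pvItemLoop ks vs seen (p ++ [v]) d := rfl
    by_cases hkv : k = v
    · subst hkv
      have hpb0 : pvPrefixLoop k (k :: vs) = [] := by simp [pvPrefixLoop]
      by_cases hc : (ks.contains k && !(seen.contains k)) = true
      · have hks : ks.contains k = true := by
          have h := hc; simp only [Bool.and_eq_true] at h; exact h.1
        have hseen : seen.contains k = false := by
          have h := hc; simp only [Bool.and_eq_true, Bool.not_eq_true'] at h; exact h.2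
        have hseen' : (seen.add k).contains k = true := by
          rw [PySem.Set.contains_iff]; simp [PySem.Set.mem_add]
        have hIHfalse : ¬ (ks.contains k = true ∧ (seen.add k).contains k = false ∧ k ∈ vs) := by
          rintro ⟨_, h2, _⟩; rw [hseen'] at h2; cases h2
        have hgd : (if p = [] then d
            else d.modify k [] (· ++ [p])).getD k [] =
            if p = [] then d.getD k [] else d.getD k [] ++ [p] := by
          by_cases hp : p = [] <;> simp [hp]
        rw [hunfold, if_pos hc, ih, if_neg hIHfalse, hgd,
            if_pos (⟨hks, hseen, List.mem_cons_self⟩ :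
              ks.contains k = true ∧ seen.contains k = false ∧ k ∈ k :: vs), hpb0]
        simp
      · have hor : ks.contains k = false ∨ seen.contains k = true := by
          by_cases h1 : ks.contains k = true
          · right
            by_cases h2 : seen.contains k = true
            · exact h2
            · have h2' : seen.contains k = false := Bool.eq_false_iff.mpr h2
              exact absurd (by rw [h1, h2']; rfl) hc
          · exact Or.inl (by simpa using h1)
        rw [hunfold, if_neg hc, ih]
        rcases hor with h | h <;> simp only [h] <;> simp
    · -- k ≠ v : the step never touches entry k, and the prefix-before-k grows by v
      have hpb : pvPrefixLoop k (v :: vs) = v :: pvPrefixLoop k vs := by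
        simp [pvPrefixLoop, hkv]
      have happ : p ++ pvPrefixLoop k (v :: vs) = (p ++ [v]) ++ pvPrefixLoop k vs := by
        rw [hpb]; simp
      by_cases hc : (ks.contains v && !(seen.contains v)) = true
      · have hseen' : (seen.add v).contains k = seen.contains k := by
          by_cases h : seen.contains k = true
          · rw [h]; rw [PySem.Set.contains_iff, PySem.Set.mem_add]
            exact Or.inl ((PySem.Set.contains_iff _ _).mp h)
          · have h' : seen.contains k = false := by simpa using h
            rw [h']
            by_cases h2 : (seen.add v).contains k = true
            · rcases (PySem.Set.mem_add seen v k).mp ((PySem.Set.contains_iff _ _).mp h2) with hm | hm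
              · have hx := (PySem.Set.contains_iff seen k).mpr hm
                rw [h'] at hx; cases hx
              · exact absurd hm hkv
            · simpa using h2
        have hgd : (if p = [] then d else d.modify v [] (· ++ [p])).getD k [] = d.getD k [] := by
          by_cases hp : p = [] <;> simp [hp, PySem.Dict.getD_modify, hkv]
        rw [hunfold, if_pos hc, ih, hseen', hgd, happ]
        by_cases hcond : ks.contains k = true ∧ seen.contains k = false ∧ k ∈ vs
        · rw [if_pos hcond, if_pos (⟨hcond.1, hcond.2.1, List.mem_cons_of_mem v hcond.2.2⟩ :
              ks.contains k = true ∧ seen.contains k = false ∧ k ∈ v :: vs)]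
        · have hcondC : ¬ (ks.contains k = true ∧ seen.contains k = false ∧ k ∈ v :: vs) := by
            rintro ⟨h1, h2, h3⟩
            rcases List.mem_cons.mp h3 with h | h
            · exact hkv h
            · exact hcond ⟨h1, h2, h⟩
          rw [if_neg hcond, if_neg hcondC]
      · rw [hunfold, if_neg hc, ih, happ]
        by_cases hcond : ks.contains k = true ∧ seen.contains k = false ∧ k ∈ vs
        · rw [if_pos hcond, if_pos (⟨hcond.1, hcond.2.1, List.mem_cons_of_mem v hcond.2.2⟩ :
              ks.contains k = true ∧ seen.contains k = false ∧ k ∈ v :: vs)]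
        · have hcondC : ¬ (ks.contains k = true ∧ seen.contains k = false ∧ k ∈ v :: vs) := by
            rintro ⟨h1, h2, h3⟩
            rcases List.mem_cons.mp h3 with h | h
            · exact hkv h
            · exact hcond ⟨h1, h2, h⟩
          rw [if_neg hcond, if_neg hcondC]

-- pvItemLoop only modifies keys that are already present (those in ks), so keys are stable
theorem pv_keys_itemLoop (ks : PySem.Set String) :
    ∀ (rest : List String) (seen : PySem.Set String) (p : List String)
      (d : PySem.Dict String (List (List String))),
      (∀ v, ks.contains v = true → v ∈ d.keys) →
      (pvItemLoop ks rest seen p d).keys = d.keys := by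
  intro rest
  induction rest with
  | nil => intro seen p d _; simp [pvItemLoop]
  | cons v vs ih =>
    intro seen p d hsub
    by_cases hc : (ks.contains v && !(seen.contains v)) = true
    · have hv : ks.contains v = true := by simpa using (Bool.and_elim_left hc)
      have hvk : v ∈ d.keys := hsub v hv
      have hdk : (if p = [] then d else d.modify v [] (· ++ [p])).keys = d.keys := by
        by_cases hp : p = []
        · rw [if_pos hp]
        · rw [if_neg hp, PySem.Dict.keys_modify]
          exact PySem.Dict.keys_insert_of_contains d _
            ((PySem.Dict.contains_iff_mem_keys _ _).mpr hvk)
      have hunfold : pvItemLoop ks (v :: vs) seen p d =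
          if (ks.contains v && !(seen.contains v)) = true then
            pvItemLoop ks vs (seen.add v) (p ++ [v]) (if p = [] then d else d.modify v [] (· ++ [p]))
          else pvItemLoop ks vs seen (p ++ [v]) d := rfl
      rw [hunfold, if_pos hc, ih _ _ _ (fun w hw => by rw [hdk]; exact hsub w hw), hdk]
    · have hunfold : pvItemLoop ks (v :: vs) seen p d =
          if (ks.contains v && !(seen.contains v)) = true then
            pvItemLoop ks vs (seen.add v) (p ++ [v]) (if p = [] then d else d.modify v [] (· ++ [p]))
          else pvItemLoop ks vs seen (p ++ [v]) d := rfl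
      rw [hunfold, if_neg hc]
      exact ih _ _ _ hsub

-- lookup in B's dict after the outer fold = A's inner fold for that kind
theorem pv_getD_outer (kinds : List String) (k : String) (hk : k ∈ kinds) :
    ∀ (items : List (List String)) (d : PySem.Dict String (List (List String))),
      (items.foldl (fun d item => pvItemLoop (PySem.Set.ofList kinds) item PySem.Set.empty [] d) d).getD k []
        = items.foldl (fun kindarr item =>
            let itemarr : List String := if item.contains k then pvPrefixLoop k item else []
            if itemarr = [] then kindarr else kindarr ++ [itemarr]) (d.getD k []) := by
  have hks : (PySem.Set.ofList kinds).contains k = true :=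
    (PySem.Set.contains_iff _ _).mpr ((PySem.Set.mem_ofList _ _).mpr hk)
  intro items
  induction items with
  | nil => intro d; simp [List.foldl]
  | cons item rest ih =>
    intro d
    simp only [List.foldl, ih]
    congr 1
    rw [pv_getD_itemLoop]
    have hse : (PySem.Set.empty : PySem.Set String).contains k = false := by
      simp [PySem.Set.empty, PySem.Set.contains]
    have hmem : item.contains k = true ↔ k ∈ item := by simp
    by_cases hin : k ∈ item
    · rw [if_pos (⟨hks, hse, hin⟩ : (PySem.Set.ofList kinds).contains k = true ∧
          (PySem.Set.empty : PySem.Set String).contains k = false ∧ k ∈ item)]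
      simp [hin]
    · rw [if_neg (fun h => hin h.2.2)]
      simp [hin]

-- A's per-kind value (the inner fold of A), named for the final assembly
def pvG (newinfo : List (List String)) (kind : String) : List (List String) :=
  newinfo.foldl (fun kindarr item =>
    let itemarr : List String := if item.contains kind then pvPrefixLoop kind item else []
    if itemarr = [] then kindarr else kindarr ++ [itemarr]) []

theorem getrootpath_eq_alt (kinds : List String) (newinfo : List (List String)) (dict : List (String × Int)) :
    getrootpath kinds newinfo dict = getrootpath_alt kinds newinfo dict := by
  have hA : getrootpath kinds newinfo dict
      = (kinds.foldl (fun allinfo kind => allinfo.insert kind (pvG newinfo kind))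
          (PySem.Dict.empty : PySem.Dict String (List (List String)))).items := rfl
  have hB : getrootpath_alt kinds newinfo dict
      = (newinfo.foldl (fun d item => pvItemLoop (PySem.Set.ofList kinds) item PySem.Set.empty [] d)
          (kinds.foldl (fun d k => d.insert k [])
            (PySem.Dict.empty : PySem.Dict String (List (List String))))).items := rfl
  rw [hA, hB]
  set dA : PySem.Dict String (List (List String)) :=
    kinds.foldl (fun allinfo kind => allinfo.insert kind (pvG newinfo kind)) PySem.Dict.empty with hdA
  set d0 : PySem.Dict String (List (List String)) :=
    kinds.foldl (fun d k => d.insert k []) PySem.Dict.empty with hd0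
  set dB : PySem.Dict String (List (List String)) :=
    newinfo.foldl (fun d item => pvItemLoop (PySem.Set.ofList kinds) item PySem.Set.empty [] d) d0 with hdB
  have hkeysA : dA.keys = PySem.Set.ofList kinds := by
    rw [hdA, PySem.Dict.keys_foldl_insert kinds
        (fun _ kind => pvG newinfo kind), PySem.Dict.keys_empty, PySem.Set.update_nil_left]
  have hndA : dA.keys.Nodup := by
    rw [hkeysA]; exact PySem.Set.nodup_ofList kinds
  have hkeys0 : d0.keys = PySem.Set.ofList kinds := by
    rw [hd0, PySem.Dict.keys_foldl_insert kinds (fun _ _ => ([] : List (List String))),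
        PySem.Dict.keys_empty, PySem.Set.update_nil_left]
  have hkeysB : dB.keys = PySem.Set.ofList kinds := by
    rw [hdB]
    have hgen : ∀ (items : List (List String)) (d : PySem.Dict String (List (List String))),
        (∀ v, (PySem.Set.ofList kinds).contains v = true → v ∈ d.keys) →
        (items.foldl (fun d item => pvItemLoop (PySem.Set.ofList kinds) item PySem.Set.empty [] d) d).keys = d.keys := by
      intro items
      induction items with
      | nil => intro d _; simp
      | cons it rest ih =>
        intro d hsub
        simp only [List.foldl]
        have hstep := pv_keys_itemLoop (PySem.Set.ofList kinds) it PySem.Set.empty [] d hsub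
        rw [ih _ (fun v hv => by rw [hstep]; exact hsub v hv), hstep]
    rw [hgen newinfo d0 (fun v hv => by
      rw [hkeys0]; exact (PySem.Set.contains_iff _ _).mp hv), hkeys0]
  have hndB : dB.keys.Nodup := by rw [hkeysB]; exact PySem.Set.nodup_ofList kinds
  rw [PySem.Dict.items_eq_map_keys dA hndA ([] : List (List String)),
      PySem.Dict.items_eq_map_keys dB hndB ([] : List (List String)),
      hkeysA, hkeysB]
  apply List.map_congr_left
  intro k hkmem
  have hk : k ∈ kinds := (PySem.Set.mem_ofList _ _).mp hkmem
  have hAval : dA.getD k [] = pvG newinfo k := by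
    rw [hdA, pv_getD_foldl_insert (pvG newinfo) k kinds PySem.Dict.empty, if_pos hk]
  have hBval : dB.getD k [] = pvG newinfo k := by
    rw [hdB, pv_getD_outer kinds k hk newinfo d0]
    have h0 : d0.getD k [] = [] := by
      rw [hd0, pv_getD_foldl_insert (fun _ => []) k kinds PySem.Dict.empty]
      simp [PySem.Dict.getD_empty]
    rw [h0]; rfl
  rw [hAval, hBval]

-- ===== VERDICT (by name: the statement is the Claim_ definition above) =====
theorem getrootpath_spec : Claim_equal_getrootpath := by
  intro kinds newinfo dict _
  unfold Spec_getrootpath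
  exact getrootpath_eq_alt kinds newinfo dict
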